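-- pv_equiv track=rewrite | github.com/ffrfffff/raster-visualization-plugin | src/utils/pb_io.py | _read_bits_with_default
-- ===== SOURCE A (Python) =====
-- from typing import Dict, List, Optional, Tuple, Union
--
-- def _read_bits_with_default(words: Dict[int, int], absolute_bit: int, width: int) -> int:
--     result = 0
--     written = 0
--     while written < width:
--         word_index = absolute_bit // 256
--         offset = absolute_bit % 256
--         chunk_width = min(width - written, 256 - offset)
--         result |= _extract_bits(words.get(word_index, 0), offset, chunk_width) << written
--         absolute_bit += chunk_width
--         written += chunk_width
--     return result
--
-- def _extract_bits(value: int, offset: int, width: int) -> int: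
--     if width <= 0:
--         return 0
--     return (value >> offset) & ((1 << width) - 1)
-- ===== SOURCE B (Python) =====
-- def _read_bits_with_default(words, absolute_bit, width):
--     if width <= 0:
--         return 0
--     start_word = absolute_bit // 256
--     offset = absolute_bit % 256
--     end_word = (absolute_bit + width - 1) // 256
--     mask256 = (1 << 256) - 1
--     combined = 0
--     for i in range(start_word, end_word + 1):
--         combined |= (words.get(i, 0) & mask256) << ((i - start_word) * 256)
--     return (combined >> offset) & ((1 << width) - 1)
-- ===== Notes on version B (the rewrite author's own statement) =====
-- stated objective: alternative
-- what changed: A extracts each chunk (shift, mask, OR into place) inside the loop with per-chunk bookkeeping of written bits; B assembles the masked overlapping 256-bit words into one big integer and performs a single shift-and-mask at the end.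
import Mathlib
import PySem

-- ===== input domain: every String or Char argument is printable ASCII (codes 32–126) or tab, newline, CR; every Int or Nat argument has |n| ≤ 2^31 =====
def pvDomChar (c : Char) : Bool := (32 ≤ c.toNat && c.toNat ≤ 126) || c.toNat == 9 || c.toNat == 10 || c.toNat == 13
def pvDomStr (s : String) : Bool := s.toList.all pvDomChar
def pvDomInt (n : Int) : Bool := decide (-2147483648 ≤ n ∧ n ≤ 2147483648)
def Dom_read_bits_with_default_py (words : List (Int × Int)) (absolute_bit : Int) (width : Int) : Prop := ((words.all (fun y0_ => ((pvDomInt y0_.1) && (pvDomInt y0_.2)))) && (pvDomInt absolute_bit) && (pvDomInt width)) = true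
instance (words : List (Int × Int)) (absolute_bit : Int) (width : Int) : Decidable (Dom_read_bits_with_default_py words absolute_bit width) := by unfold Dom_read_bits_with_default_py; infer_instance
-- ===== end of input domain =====

-- B replaces A's chunk-by-chunk extract-and-OR loop by assembling the masked overlapping
-- words into one big integer and doing a single shift-and-mask at the end (objective: alternative).

-- ===== PORT A =====

-- _extract_bits
def pvExtractBits (value : Int) (offset : Int) (width : Int) : Int :=
  if width ≤ 0 then 0
  else PySem.Int.band (value >>> offset.toNat) ((1 <<< width.toNat) - 1)

-- the while-loop of _read_bits_with_default; state = (absolute_bit, result, written);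
-- shifts use .toNat: offset = absolute_bit % 256 and written are always nonnegative here
def pvReadLoop (words : PySem.Dict Int Int) (absolute_bit width result written : Int) : Int :=
  if _h : written < width then
    let word_index := PySem.Int.floordiv absolute_bit 256
    let offset := PySem.Int.mod absolute_bit 256
    let chunk_width := min (width - written) (256 - offset)
    pvReadLoop words (absolute_bit + chunk_width) width
      (PySem.Int.bor result
        (pvExtractBits (PySem.Dict.getD words word_index 0) offset chunk_width <<< written.toNat))
      (written + chunk_width)
  else result
termination_by (width - written).toNat
decreasing_by
  have h1 : 0 ≤ PySem.Int.mod absolute_bit 256 := PySem.Int.mod_nonneg _ (by norm_num)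
  have h2 : PySem.Int.mod absolute_bit 256 < 256 := PySem.Int.mod_lt _ (by norm_num)
  omega

def read_bits_with_default_py (words : List (Int × Int)) (absolute_bit : Int) (width : Int) : Int :=
  pvReadLoop (PySem.Dict.ofList words) absolute_bit width 0 0

-- ===== PORT B =====
def read_bits_with_default_py_alt (words : List (Int × Int)) (absolute_bit : Int) (width : Int) : Int :=
  if width ≤ 0 then 0
  else
    let d := PySem.Dict.ofList words
    let start_word := PySem.Int.floordiv absolute_bit 256
    let offset := PySem.Int.mod absolute_bit 256
    let end_word := PySem.Int.floordiv (absolute_bit + width - 1) 256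
    let mask256 : Int := (1 <<< 256) - 1
    let combined := (PySem.List.pyRange start_word (end_word + 1) 1).foldl
      (fun c i =>
        PySem.Int.bor c
          (PySem.Int.band (PySem.Dict.getD d i 0) mask256 <<< ((i - start_word) * 256).toNat)) 0
    PySem.Int.band (combined >>> offset.toNat) ((1 <<< width.toNat) - 1)

-- ===== PRECONDITION & SPEC =====
def Spec_read_bits_with_default_py (words : List (Int × Int)) (absolute_bit : Int) (width : Int) (out : Int) : Prop := out = read_bits_with_default_py_alt words absolute_bit width
instance (words : List (Int × Int)) (absolute_bit : Int) (width : Int) (out : Int) : Decidable (Spec_read_bits_with_default_py words absolute_bit width out) := by unfold Spec_read_bits_with_default_py; infer_instance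

-- ===== CLAIM (what is proved, stated in full; the proofs are below) =====
def Claim_equal_read_bits_with_default_py : Prop := ∀ (words : List (Int × Int)) (absolute_bit : Int) (width : Int), Dom_read_bits_with_default_py words absolute_bit width → Spec_read_bits_with_default_py words absolute_bit width (read_bits_with_default_py words absolute_bit width)

-- ===== LEMMAS AND PROOFS =====

-- the value of the window of n words starting at word s, each word reduced mod 2^256
def pvC (g : Int → Int) (s : Int) : Nat → Int
  | 0 => 0
  | n + 1 => g s % (2 ^ 256 : Int) + (2 ^ 256 : Int) * pvC g (s + 1) n

-- what A's loop still has to produce when `rem` bits remain to be read at bit `abit`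
def pvR (g : Int → Int) (abit rem : Int) : Int :=
  if rem ≤ 0 then 0
  else (pvC g (abit / 256) ((abit + rem - 1) / 256 - abit / 256 + 1).toNat / 2 ^ (abit % 256).toNat)
         % 2 ^ rem.toNat

theorem pv_band_mask (x : Int) (c : Nat) :
    PySem.Int.band x ((1 <<< c) - 1) = x % (2 ^ c : Int) := by
  have hsh : (1 <<< c : Nat) = 2 ^ c := by rw [Nat.shiftLeft_eq]; ring
  have hm : ((1 <<< c : Int) - 1) = (2 ^ c : Int) - 1 := by push_cast [hsh]; ring
  have hcast : ((2 ^ c : Nat) : Int) = (2 : Int) ^ c := by push_cast; ring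
  have hpow : (0 : Int) < 2 ^ c := by positivity
  have h1 : ((2 : Int) ^ c - 1).toNat = 2 ^ c - 1 := by omega
  rw [hm]
  unfold PySem.Int.band
  by_cases hx : 0 ≤ x
  · rw [if_pos hx, if_pos (by omega), h1, Nat.and_two_pow_sub_one_eq_mod]
    rw [Int.natCast_emod]
    push_cast
    rw [Int.toNat_of_nonneg hx]
  · rw [if_neg (by omega), if_pos (by omega), h1, Nat.and_comm,
      Nat.and_two_pow_sub_one_eq_mod]
    set k : Nat := (-x - 1).toNat with hk
    have hxk : x = -((k : Int) + 1) := by omega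
    have hr : k % 2 ^ c < 2 ^ c := Nat.mod_lt _ (by positivity)
    have hkmod : ((k % 2 ^ c : Nat) : Int) = (k : Int) % 2 ^ c := by
      rw [Int.natCast_emod]; push_cast; ring
    have key : x % (2 : Int) ^ c = 2 ^ c - 1 - ((k % 2 ^ c : Nat) : Int) := by
      have hq : (k : Int) = 2 ^ c * ((k : Int) / 2 ^ c) + ((k % 2 ^ c : Nat) : Int) := by
        rw [hkmod]; exact (Int.ediv_add_emod _ _).symm
      have hx2 : x = (2 ^ c - 1 - ((k % 2 ^ c : Nat) : Int))
          + 2 ^ c * (-((k : Int) / 2 ^ c) - 1) := by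
        linear_combination hxk - hq
      rw [hx2, Int.add_mul_emod_self_left]
      have hrI : ((k % 2 ^ c : Nat) : Int) < 2 ^ c := by omega
      apply Int.emod_eq_of_lt <;> omega
    rw [key]
    omega

theorem pv_nat_lor_disjoint (a b k : Nat) (h : a < 2 ^ k) : a ||| b * 2 ^ k = a + b * 2 ^ k := by
  have hsum : a + b * 2 ^ k = 2 ^ k * b + a := by ring
  apply Nat.eq_of_testBit_eq
  intro i
  rw [Nat.testBit_lor, Nat.testBit_mul_two_pow, hsum, Nat.testBit_two_pow_mul_add b h]
  by_cases hik : i < k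
  · simp [hik, Nat.not_le.mpr hik]
  · have hb : a.testBit i = false :=
      Nat.testBit_eq_false_of_lt (lt_of_lt_of_le h (Nat.pow_le_pow_right (by norm_num) (by omega)))
    simp [hik, Nat.not_lt.mp hik, hb]

theorem pv_bor_disjoint (a b : Int) (k : Nat) (h0 : 0 ≤ a) (h1 : a < 2 ^ k) (hb : 0 ≤ b) :
    PySem.Int.bor a (b <<< k) = a + b * 2 ^ k := by
  have hsl : b <<< k = b * 2 ^ k := Int.shiftLeft_eq b k
  have hbk : 0 ≤ b * 2 ^ k := by positivity
  rw [hsl, PySem.Int.bor_of_nonneg h0 hbk]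
  have hcast : ((2 ^ k : Nat) : Int) = (2 : Int) ^ k := by push_cast; ring
  have htn : (b * 2 ^ k).toNat = b.toNat * 2 ^ k := by
    rcases Int.eq_ofNat_of_zero_le hb with ⟨n, rfl⟩
    rw [← hcast, ← Nat.cast_mul, Int.toNat_natCast, Int.toNat_natCast]
  rw [htn, pv_nat_lor_disjoint _ _ _ (by omega)]
  push_cast
  rw [Int.toNat_of_nonneg h0, Int.toNat_of_nonneg hb]

theorem pvC_bounds (g : Int → Int) (s : Int) (n : Nat) :
    0 ≤ pvC g s n ∧ pvC g s n < 2 ^ (256 * n) := by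
  induction n generalizing s with
  | zero => simp [pvC]
  | succ n ih =>
    obtain ⟨ih0, ih1⟩ := ih (s + 1)
    have hM : (0:Int) < 2 ^ 256 := by positivity
    have hmod0 : 0 ≤ g s % (2 ^ 256 : Int) := Int.emod_nonneg _ (by positivity)
    have hmod1 : g s % (2 ^ 256 : Int) < 2 ^ 256 := Int.emod_lt_of_pos _ hM
    have hpow : (2:Int) ^ (256 * (n+1)) = 2 ^ 256 * 2 ^ (256 * n) := by
      rw [← pow_add]; ring_nf
    constructor
    · simp only [pvC]; positivity
    · simp only [pvC, hpow]; nlinarith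

theorem pvC_snoc (g : Int → Int) (s : Int) (n : Nat) :
    pvC g s (n + 1) = pvC g s n + 2 ^ (256 * n) * (g (s + n) % (2 ^ 256 : Int)) := by
  induction n generalizing s with
  | zero => simp [pvC]
  | succ n ih =>
    have h1 : pvC g s (n + 1 + 1) = g s % (2 ^ 256 : Int) + (2 ^ 256 : Int) * pvC g (s + 1) (n + 1) := rfl
    rw [h1, ih (s + 1)]
    have hpow : (2:Int) ^ (256 * (n+1)) = 2 ^ 256 * 2 ^ (256 * n) := by
      rw [← pow_add]; ring_nf
    have harg : s + 1 + (n : Int) = s + ((n : Nat) + 1 : Nat) := by omega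
    rw [harg] at *
    simp only [pvC, hpow]
    push_cast
    ring_nf

theorem pv_mod_div_mod (x : Int) (a b c : Nat) (h : a + b ≤ c) :
    x % (2 ^ c : Int) / 2 ^ a % 2 ^ b = x / 2 ^ a % 2 ^ b := by
  have hq := Int.emod_emod_of_dvd x (pow_dvd_pow (2:Int) (le_refl c))
  have hxm : x % (2 ^ c : Int) = x - 2 ^ c * (x / 2 ^ c) := Int.emod_def x _
  set q := x / 2 ^ c with hqdef
  have hc : c = a + (c - a) := by omega
  have hsplit : (2:Int) ^ c = 2 ^ (c - a) * 2 ^ a := by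
    rw [← pow_add]; congr 1; omega
  have hdiv : x % (2 ^ c : Int) / 2 ^ a = x / 2 ^ a + (-(2 ^ (c - a) * q)) := by
    rw [hxm]
    have : x - 2 ^ c * q = x + (-(2 ^ (c-a) * q)) * 2 ^ a := by rw [hsplit]; ring
    rw [this, Int.add_mul_ediv_right _ _ (by positivity)]
  rw [hdiv]
  have hmul : (-((2:Int) ^ (c - a) * q)) = (-(2 ^ (c - a - b) * q)) * 2 ^ b := by
    rw [show (2:Int)^(c-a) = 2^(c-a-b) * 2^b by rw [← pow_add]; congr 1; omega]; ring
  rw [hmul, Int.add_mul_emod_self_right]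

theorem pv_mod_split (x y : Int) (c m : Nat) (h0 : 0 ≤ x) (h1 : x < 2 ^ c) :
    (x + 2 ^ c * y) % (2 ^ (c + m) : Int) = x + 2 ^ c * (y % 2 ^ m) := by
  have hy := Int.emod_def y ((2:Int) ^ m)
  have hr0 : 0 ≤ y % (2:Int) ^ m := Int.emod_nonneg _ (by positivity)
  have hr1 : y % (2:Int) ^ m < 2 ^ m := Int.emod_lt_of_pos _ (by positivity)
  have hrw : x + 2 ^ c * y = (x + 2 ^ c * (y % 2 ^ m)) + (2 ^ (c + m) : Int) * (y / 2 ^ m) := by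
    rw [pow_add]
    nlinarith [hy]
  rw [hrw, Int.add_mul_emod_self_left]
  apply Int.emod_eq_of_lt
  · positivity
  · have : (2:Int) ^ (c + m) = 2 ^ c * 2 ^ m := pow_add 2 c m
    nlinarith

theorem pv_fold_eq_pvC (g : Int → Int) (s : Int) (n : Nat) :
    (PySem.List.pyRange s (s + n) 1).foldl
      (fun c i => PySem.Int.bor c
        (PySem.Int.band (g i) ((1 <<< 256) - 1) <<< ((i - s) * 256).toNat)) 0 = pvC g s n := by
  induction n with
  | zero => simp [pvC]
  | succ n ih =>
    have hrange : PySem.List.pyRange s (s + (n + 1 : Nat)) 1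
        = PySem.List.pyRange s (s + n) 1 ++ [s + n] := by
      rw [PySem.List.pyRange_one, PySem.List.pyRange_one]
      have h1 : (s + ((n:Nat) + 1 : Nat) - s).toNat = n + 1 := by push_cast; omega
      have h2 : (s + (n:Nat) - s).toNat = n := by omega
      rw [h1, h2, List.range_succ, List.map_append]
      simp
    rw [hrange, List.foldl_append, ih]
    simp only [List.foldl_cons, List.foldl_nil]
    have htn : ((s + (n:Int) - s) * 256).toNat = 256 * n := by push_cast; omega
    rw [htn, pv_band_mask]
    obtain ⟨hb0, hb1⟩ := pvC_bounds g s n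
    have hmod0 : 0 ≤ g (s + n) % (2 ^ 256 : Int) := Int.emod_nonneg _ (by positivity)
    rw [pv_bor_disjoint _ _ _ hb0 hb1 hmod0, pvC_snoc]
    ring

theorem pv_ediv_256 (s r : Int) (h0 : 0 ≤ r) (h1 : r < 256) : (256 * s + r) / 256 = s := by
  rw [add_comm, Int.add_mul_ediv_left r s (by norm_num), Int.ediv_eq_zero_of_lt h0 h1]
  ring

theorem pvR_step (g : Int → Int) (abit rem : Int) (hrem : 0 < rem) :
    pvR g abit rem =
      (g (abit / 256) / 2 ^ (abit % 256).toNat) % 2 ^ (min rem (256 - abit % 256)).toNat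
      + 2 ^ (min rem (256 - abit % 256)).toNat
        * pvR g (abit + min rem (256 - abit % 256)) (rem - min rem (256 - abit % 256)) := by
  have hoff0 : 0 ≤ abit % 256 := Int.emod_nonneg _ (by norm_num)
  have hoff1 : abit % 256 < 256 := Int.emod_lt_of_pos _ (by norm_num)
  have habit : 256 * (abit / 256) + abit % 256 = abit := Int.ediv_add_emod abit 256
  set s : Int := abit / 256 with hs
  set off : Int := abit % 256 with hoffdef
  set c : Int := min rem (256 - off) with hc
  have hc0 : 0 < c := by omega
  by_cases hcase : rem ≤ 256 - off
  · -- c = rem : last chunk, recursion ends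
    have hceq : c = rem := by omega
    have hz : rem - c = 0 := by omega
    have hR0 : pvR g (abit + c) (rem - c) = 0 := by rw [hz]; simp [pvR]
    rw [hR0, mul_zero, add_zero, pvR, if_neg (by omega)]
    have hend : (abit + rem - 1) / 256 = s := by
      rw [show abit + rem - 1 = 256 * s + (off + rem - 1) by omega]
      exact pv_ediv_256 _ _ (by omega) (by omega)
    rw [hend]
    have hn : (s - s + 1).toNat = 1 := by omega
    rw [hn]
    have hC1 : pvC g s 1 = g s % (2 ^ 256 : Int) := by simp [pvC]
    rw [hC1, hceq]
    exact pv_mod_div_mod (g s) off.toNat rem.toNat 256 (by omega)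
  · -- c = 256 - off : chunk fills to the word boundary
    have hceq : c = 256 - off := by omega
    have hrem' : 0 < rem - c := by omega
    have habit' : abit + c = 256 * (s + 1) := by omega
    have hs' : (abit + c) / 256 = s + 1 := by
      rw [habit', show (256:Int) * (s+1) = 256 * (s+1) + 0 by ring]
      exact pv_ediv_256 _ _ (by norm_num) (by norm_num)
    have hoff' : (abit + c) % 256 = 0 := by
      rw [habit']; exact Int.mul_emod_right 256 (s+1)
    -- the common end word
    set e : Int := (abit + rem - 1) / 256 with he
    have hnum : abit + c + (rem - c) - 1 = abit + rem - 1 := by ring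
    have he1 : s + 1 ≤ e := by
      rw [he, show abit + rem - 1 = 256 * (s + 1) + (off + rem - 1 - 256) by omega]
      rw [show (256:Int) * (s+1) + (off + rem - 1 - 256)
            = 256 * (s + 1 + (off + rem - 1 - 256) / 256) + (off + rem - 1 - 256) % 256 by
        have := Int.ediv_add_emod (off + rem - 1 - 256) 256; ring_nf; omega]
      rw [pv_ediv_256 _ _ (Int.emod_nonneg _ (by norm_num)) (Int.emod_lt_of_pos _ (by norm_num))]
      have : 0 ≤ (off + rem - 1 - 256) / 256 := Int.ediv_nonneg (by omega) (by norm_num)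
      omega
    set n' : Nat := (e - (s + 1) + 1).toNat with hn'
    have hn : (e - s + 1).toNat = n' + 1 := by omega
    -- unfold both sides
    rw [pvR, if_neg (by omega), pvR, if_neg (by omega), hnum, hs', hoff', hn]
    rw [show abit / 256 = s from rfl, show ((abit + rem - 1) / 256 - (s + 1) + 1).toNat = n' from rfl]
    rw [show (0:Int).toNat = 0 from rfl, pow_zero, Int.ediv_one]
    set X : Int := pvC g (s + 1) n' with hX
    set A : Int := g s % (2 ^ 256 : Int) with hA
    have hCdef : pvC g s (n' + 1) = A + (2 ^ 256 : Int) * X := rfl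
    have hA0 : 0 ≤ A := Int.emod_nonneg _ (by positivity)
    have hA1 : A < 2 ^ 256 := Int.emod_lt_of_pos _ (by positivity)
    set O : Nat := off.toNat with hO
    set Cn : Nat := c.toNat with hCn
    have hOC : O + Cn = 256 := by omega
    have hpow : (2:Int) ^ 256 = 2 ^ Cn * 2 ^ O := by rw [← pow_add]; congr 1; omega
    have hdiv : pvC g s (n' + 1) / 2 ^ O = A / 2 ^ O + 2 ^ Cn * X := by
      rw [hCdef, show A + (2 ^ 256 : Int) * X = A + (2 ^ Cn * X) * 2 ^ O by rw [hpow]; ring,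
        Int.add_mul_ediv_right _ _ (by positivity)]
    rw [hdiv]
    set x : Int := A / 2 ^ O with hxdef
    have hx0 : 0 ≤ x := Int.ediv_nonneg hA0 (by positivity)
    have hx1 : x < 2 ^ Cn := by
      rw [hxdef, Int.ediv_lt_iff_lt_mul (by positivity)]
      calc A < 2 ^ 256 := hA1
        _ = 2 ^ Cn * 2 ^ O := hpow
    have hRsplit : rem.toNat = Cn + (rem - c).toNat := by omega
    rw [hRsplit, pv_mod_split x X Cn (rem - c).toNat hx0 hx1]
    have hxeq : g s / 2 ^ O % 2 ^ Cn = x := by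
      rw [← pv_mod_div_mod (g s) O Cn 256 (by omega)]
      exact Int.emod_eq_of_lt hx0 hx1
    rw [hxeq]

theorem pvReadLoop_eq (fuel : Nat) (d : PySem.Dict Int Int) :
    ∀ (abit width result written : Int), 0 ≤ written → 0 ≤ result →
      result < 2 ^ written.toNat → (width - written).toNat ≤ fuel →
      pvReadLoop d abit width result written
        = result + 2 ^ written.toNat * pvR (fun i => PySem.Dict.getD d i 0) abit (width - written) := by
  induction fuel with
  | zero =>
    intro abit width result written hw0 hr0 hr1 hfuel
    rw [pvReadLoop, dif_neg (by omega), pvR, if_pos (by omega)]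
    ring
  | succ fuel ih =>
    intro abit width result written hw0 hr0 hr1 hfuel
    by_cases h : written < width
    · rw [pvReadLoop, dif_pos h]
      simp only []
      have h256 : (0:Int) < 256 := by norm_num
      rw [PySem.Int.mod_eq_emod_of_pos h256, PySem.Int.floordiv_eq_ediv_of_pos h256]
      have hoff0 : 0 ≤ abit % 256 := Int.emod_nonneg _ (by norm_num)
      have hoff1 : abit % 256 < 256 := Int.emod_lt_of_pos _ (by norm_num)
      set g : Int → Int := fun i => PySem.Dict.getD d i 0 with hg
      set off : Int := abit % 256 with hoff
      set c : Int := min (width - written) (256 - off) with hc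
      have hc0 : 0 < c := by omega
      -- the extracted chunk
      have hex : pvExtractBits (g (abit / 256)) off c
          = g (abit / 256) / 2 ^ off.toNat % 2 ^ c.toNat := by
        rw [pvExtractBits, if_neg (by omega), Int.shiftRight_eq_div_pow, pv_band_mask]
        norm_cast
      set ch : Int := g (abit / 256) / 2 ^ off.toNat % 2 ^ c.toNat with hch
      have hch0 : 0 ≤ ch := Int.emod_nonneg _ (by positivity)
      have hch1 : ch < 2 ^ c.toNat := Int.emod_lt_of_pos _ (by positivity)
      have hbor : PySem.Int.bor result (pvExtractBits (g (abit / 256)) off c <<< written.toNat)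
          = result + ch * 2 ^ written.toNat := by
        rw [hex, pv_bor_disjoint _ _ _ hr0 hr1 hch0]
      rw [hbor]
      have htn : (written + c).toNat = written.toNat + c.toNat := by omega
      have hpowwc : (2:Int) ^ (written + c).toNat = 2 ^ written.toNat * 2 ^ c.toNat := by
        rw [htn, pow_add]
      have hres1 : result + ch * 2 ^ written.toNat < 2 ^ (written + c).toNat := by
        rw [hpowwc]; nlinarith
      rw [ih (abit + c) width (result + ch * 2 ^ written.toNat) (written + c) (by omega)
        (by positivity) hres1 (by omega)]
      rw [show width - (written + c) = (width - written) - c by ring]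
      rw [pvR_step g abit (width - written) (by omega)]
      rw [show min (width - written) (256 - abit % 256) = c from rfl]
      rw [hpowwc]
      ring
    · rw [pvReadLoop, dif_neg h, pvR, if_pos (by omega)]
      ring

-- ===== VERDICT (by name: the statement is the Claim_ definition above) =====
theorem read_bits_with_default_py_spec : Claim_equal_read_bits_with_default_py := by
  unfold Claim_equal_read_bits_with_default_py
  intro words abit width _hdom
  unfold Spec_read_bits_with_default_py
  unfold read_bits_with_default_py read_bits_with_default_py_alt
  set d := PySem.Dict.ofList words with hd
  set g : Int → Int := fun i => PySem.Dict.getD d i 0 with hg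
  by_cases hw : width ≤ 0
  · rw [if_pos hw, pvReadLoop, dif_neg (by omega)]
  · rw [if_neg hw]
    have h256 : (0:Int) < 256 := by norm_num
    rw [pvReadLoop_eq ((width : Int).toNat) d abit width 0 0 (le_refl 0) (le_refl 0)
      (by norm_num) (by omega)]
    simp only [Int.toNat_zero, pow_zero, one_mul, zero_add, sub_zero]
    rw [PySem.Int.mod_eq_emod_of_pos h256, PySem.Int.floordiv_eq_ediv_of_pos h256,
      PySem.Int.floordiv_eq_ediv_of_pos h256]
    set s : Int := abit / 256 with hs
    set e : Int := (abit + width - 1) / 256 with he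
    have hse : s ≤ e := Int.ediv_le_ediv (by norm_num) (by omega)
    set n : Nat := (e - s + 1).toNat with hn
    have hrange : e + 1 = s + (n : Int) := by omega
    rw [hrange, pv_fold_eq_pvC g s n]
    rw [Int.shiftRight_eq_div_pow, pv_band_mask]
    rw [pvR, if_neg (by omega)]
    push_cast
    rfl
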